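-- pv_equiv track=rewrite | github.com/LXF-DX3906/DataMiningA1-K-means | method3/method3.py | is_change
-- ===== SOURCE A (Python) =====
-- import operator
--
-- def is_change(last_cluster, cluster):
--     equ_n = 0
--     for index in cluster:
--         for index2 in last_cluster:
--             if operator.eq(cluster[index], last_cluster[index2]):
--                 equ_n += 1
--     if equ_n == 2:
--         return False
--     return True
-- ===== SOURCE B (Python) =====
-- def is_change(last_cluster, cluster):
--     counts = {}
--     for v in last_cluster.values():
--         k = tuple(v)
--         counts[k] = counts.get(k, 0) + 1
--     equ_n = 0
--     for v in cluster.values():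
--         equ_n += counts.get(tuple(v), 0)
--     return equ_n != 2
-- ===== Notes on version B (the rewrite author's own statement) =====
-- stated objective: faster
-- what changed: replaces the nested loop over all (cluster, last_cluster) value pairs by one pass that builds a multiplicity dict of last_cluster's values (as tuples) and one pass summing lookups over cluster's values
import Mathlib
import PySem

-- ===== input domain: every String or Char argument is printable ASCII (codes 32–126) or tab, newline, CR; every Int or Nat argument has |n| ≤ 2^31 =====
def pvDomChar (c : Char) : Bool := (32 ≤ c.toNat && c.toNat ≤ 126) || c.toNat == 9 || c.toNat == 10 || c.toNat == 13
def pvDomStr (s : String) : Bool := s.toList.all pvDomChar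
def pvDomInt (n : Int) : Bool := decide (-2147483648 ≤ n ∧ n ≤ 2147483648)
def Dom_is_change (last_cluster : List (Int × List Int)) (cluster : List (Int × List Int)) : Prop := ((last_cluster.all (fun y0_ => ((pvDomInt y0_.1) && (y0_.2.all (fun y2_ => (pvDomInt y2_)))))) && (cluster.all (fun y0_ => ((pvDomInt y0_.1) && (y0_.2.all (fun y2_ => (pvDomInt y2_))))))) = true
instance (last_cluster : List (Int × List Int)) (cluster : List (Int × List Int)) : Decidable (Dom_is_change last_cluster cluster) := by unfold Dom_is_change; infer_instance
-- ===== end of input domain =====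

-- B replaces A's nested loop over all value pairs by a multiplicity dict of
-- last_cluster's values plus one summing pass (measured faster, asymptotic).

-- ===== PORT A =====
-- A's nested dict loop: for each key of cluster, for each key of last_cluster,
-- count equal looked-up values; return False iff the count is exactly 2.
def is_change (last_cluster : List (Int × List Int)) (cluster : List (Int × List Int)) : Bool :=
  let equ_n : Int := cluster.foldl (fun n p =>
    last_cluster.foldl (fun n q =>
      if (PySem.Dict.mk cluster).getD p.1 [] == (PySem.Dict.mk last_cluster).getD q.1 []
      then n + 1 else n) n) 0
  if equ_n == 2 then false else true

-- ===== PORT B =====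
-- B's two passes: counts = multiplicity dict of last_cluster's values, then
-- equ_n = sum over cluster's values of counts.get(v, 0).
def is_change_alt (last_cluster : List (Int × List Int)) (cluster : List (Int × List Int)) : Bool :=
  let counts : PySem.Dict (List Int) Int :=
    (PySem.Dict.mk last_cluster).values.foldl
      (fun d x => d.insert x (d.getD x 0 + 1)) PySem.Dict.empty
  let equ_n : Int := (PySem.Dict.mk cluster).values.foldl
    (fun n v => n + counts.getD v 0) 0
  equ_n != 2

-- ===== PRECONDITION & SPEC =====
-- Pre_ excludes association lists with duplicate keys: they do not represent
-- Python dicts (whose keys are unique), so the first-match lookup there is an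
-- artefact of the encoding, not a behaviour of A.
def Pre_is_change (last_cluster : List (Int × List Int)) (cluster : List (Int × List Int)) : Prop :=
  (last_cluster.map (·.1)).Nodup ∧ (cluster.map (·.1)).Nodup
instance (last_cluster : List (Int × List Int)) (cluster : List (Int × List Int)) : Decidable (Pre_is_change last_cluster cluster) := by unfold Pre_is_change; infer_instance
def pvWitness_is_change : (List (Int × List Int)) × (List (Int × List Int)) :=
  ([(0, [1, 2]), (1, [3])], [(0, [1, 2]), (2, [])])
def Spec_is_change (last_cluster : List (Int × List Int)) (cluster : List (Int × List Int)) (out : Bool) : Prop := out = is_change_alt last_cluster cluster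
instance (last_cluster : List (Int × List Int)) (cluster : List (Int × List Int)) (out : Bool) : Decidable (Spec_is_change last_cluster cluster out) := by unfold Spec_is_change; infer_instance

-- ===== CLAIM (what is proved, stated in full; the proofs are below) =====
def Claim_equal_is_change : Prop := ∀ (last_cluster : List (Int × List Int)) (cluster : List (Int × List Int)), Dom_is_change last_cluster cluster → Pre_is_change last_cluster cluster → Spec_is_change last_cluster cluster (is_change last_cluster cluster)

-- ===== LEMMAS AND PROOFS =====

-- Inner loop of A over one fixed value v counts occurrences of v in ws.
theorem inner_count (v : List Int) (ws : List (List Int)) (n : Int) :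
    ws.foldl (fun n w => if v == w then n + 1 else n) n = n + (ws.count v : Int) := by
  induction ws generalizing n with
  | nil => simp
  | cons w ws ih =>
    simp only [List.foldl_cons, List.count_cons, ih]
    by_cases h : v = w
    · simp [h]; omega
    · have h' : (w == v) = false := by simp; exact fun e => h e.symm
      have h'' : (v == w) = false := by simp; exact h
      simp [h', h'']

-- With Nodup keys, looking a member pair's key up yields its value.
theorem getD_self (d : List (Int × List Int)) (hnd : (d.map (·.1)).Nodup)
    (p : Int × List Int) (hp : p ∈ d) :
    (PySem.Dict.mk d).getD p.1 [] = p.2 :=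
  PySem.Dict.getD_of_mem_items (d := PySem.Dict.mk d) (k := p.1) (v := p.2)
    (by simpa using hp) (by simpa [PySem.Dict.keys] using hnd) []

-- ===== VERDICT-PROOF =====
theorem is_change_spec : Claim_equal_is_change := by
  intro last_cluster cluster _ hpre
  obtain ⟨hl, hc⟩ := hpre
  unfold Spec_is_change is_change is_change_alt
  simp only [PySem.Dict.values_mk]
  have hA : cluster.foldl (fun n p =>
      last_cluster.foldl (fun n q =>
        if (PySem.Dict.mk cluster).getD p.1 [] == (PySem.Dict.mk last_cluster).getD q.1 []
        then n + 1 else n) n) (0 : Int)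
      = cluster.foldl (fun (n : Int) p => n + ((last_cluster.map (·.2)).count p.2 : Int)) 0 := by
    apply PySem.List.foldl_congr_mem
    intro n p hp
    have hcp := getD_self cluster hc p hp
    have h1 : last_cluster.foldl (fun (n : Int) q =>
        if (PySem.Dict.mk cluster).getD p.1 [] == (PySem.Dict.mk last_cluster).getD q.1 []
        then n + 1 else n) n
        = last_cluster.foldl (fun (n : Int) q => if p.2 == q.2 then n + 1 else n) n := by
      apply PySem.List.foldl_congr_mem
      intro m q hq
      rw [hcp, getD_self last_cluster hl q hq]
    have h2 := inner_count p.2 (last_cluster.map (·.2)) n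
    rw [List.foldl_map] at h2
    rw [h1, h2]
  rw [hA]
  have hB : (cluster.map (·.2)).foldl (fun (n : Int) v => n +
      ((last_cluster.map (·.2)).foldl
        (fun d x => d.insert x (d.getD x 0 + 1)) PySem.Dict.empty).getD v 0) (0 : Int)
      = cluster.foldl (fun (n : Int) p => n + ((last_cluster.map (·.2)).count p.2 : Int)) 0 := by
    rw [List.foldl_map]
    apply PySem.List.foldl_congr_mem
    intro n p _
    rw [PySem.Dict.getD_foldl_insert_add_one]
    simp [PySem.Dict.getD_empty]
  rw [hB]
  rcases h : (cluster.foldl (fun (n : Int) p => n + ((last_cluster.map (·.2)).count p.2 : Int)) (0 : Int)) == 2 with _ | _ <;>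
    simp_all [bne]
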